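-- pv_equiv track=rewrite | github.com/shiyi-oo/hypergraph-lower-ricci-curvature | code/src/util.py | compute_neighborhood_sizes
-- ===== SOURCE A (Python) =====
-- from collections import Counter, defaultdict
--
-- def compute_neighborhood_sizes(
--     H: list[list[int]],
--     v_neigh: dict[int, set[int]]
-- ) -> dict[int, tuple[int,int,int]]:
--     """
--     For each hyperedge idx:
--       ( size_of_common_neighbors,
--         max_individual_neighborhood_size,
--         min_individual_neighborhood_size )
--     """
--     size_dict: dict[int, tuple[int,int,int]] = defaultdict(set)
--     for idx, edge in enumerate(H):
--         if not edge:
--             size_dict[idx] = (0, 0, 0)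
--             continue
--         # sizes of each node's neighbor‐set
--         sizes = [len(v_neigh[v]) for v in edge]
--         common = set.intersection(*(v_neigh[v] for v in edge))
--         size_dict[idx] = (len(common), max(sizes), min(sizes))
--     return size_dict
-- ===== SOURCE B (Python) =====
-- from collections import Counter
--
-- def compute_neighborhood_sizes(
--     H: list[list[int]],
--     v_neigh: dict[int, set[int]]
-- ) -> dict[int, tuple[int, int, int]]:
--     # One pass per edge: a Counter tallies every neighbor occurrence and running
--     # max/min track neighborhood sizes; an element is common to the whole edge
--     # exactly when its tally equals len(edge).
--     size_dict: dict[int, tuple[int, int, int]] = {}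
--     for idx, edge in enumerate(H):
--         if not edge:
--             size_dict[idx] = (0, 0, 0)
--             continue
--         k = len(edge)
--         v0, rest = edge[0], edge[1:]
--         tally = Counter()
--         nv0 = v_neigh[v0]
--         mx = mn = len(nv0)
--         for x in nv0:
--             tally[x] += 1
--         for v in rest:
--             nv = v_neigh[v]
--             sz = len(nv)
--             if sz > mx:
--                 mx = sz
--             if sz < mn:
--                 mn = sz
--             for x in nv:
--                 tally[x] += 1
--         common = len([c for c in tally.values() if c == k])
--         size_dict[idx] = (common, mx, mn)
--     return size_dict
-- ===== Notes on version B (the rewrite author's own statement) =====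
-- stated objective: alternative
-- what changed: Replaces the per-edge set.intersection of all neighbor sets (plus a sizes list fed to max/min) by a single pass per edge that tallies every neighbor occurrence in a Counter and keeps running max/min of the neighborhood sizes; the common-neighbor size is the number of tally entries equal to len(edge). Pre_ excludes only inputs where some edge vertex is missing from v_neigh (both programs raise KeyError there) and, on the Lean side, requires v_neigh values to be duplicate-free, which is just the Python set convention.
import Mathlib
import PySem

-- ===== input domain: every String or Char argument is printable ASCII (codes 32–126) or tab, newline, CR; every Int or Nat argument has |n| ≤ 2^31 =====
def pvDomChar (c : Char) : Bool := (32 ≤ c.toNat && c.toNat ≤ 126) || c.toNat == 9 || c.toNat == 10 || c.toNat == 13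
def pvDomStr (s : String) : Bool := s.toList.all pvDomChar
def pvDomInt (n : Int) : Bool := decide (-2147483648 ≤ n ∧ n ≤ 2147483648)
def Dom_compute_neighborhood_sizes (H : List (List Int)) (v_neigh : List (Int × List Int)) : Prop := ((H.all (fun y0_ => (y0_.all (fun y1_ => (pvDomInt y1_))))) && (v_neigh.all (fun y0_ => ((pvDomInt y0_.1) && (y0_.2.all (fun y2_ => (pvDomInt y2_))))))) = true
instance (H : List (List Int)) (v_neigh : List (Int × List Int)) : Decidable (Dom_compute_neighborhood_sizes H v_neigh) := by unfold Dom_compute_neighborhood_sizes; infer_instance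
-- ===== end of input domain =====

-- B replaces the per-edge set.intersection (plus a sizes list fed to max/min) by one pass per
-- edge with a Counter of neighbor occurrences and running max/min; same cost, different algorithm.

-- v_neigh[v] (KeyError excluded by Pre_; shared total lookup helper for both ports)
def pvLookup (v_neigh : List (Int × List Int)) (v : Int) : List Int :=
  ((PySem.Dict.mk v_neigh).get? v).getD []

-- ===== PORT A =====
def compute_neighborhood_sizes (H : List (List Int)) (v_neigh : List (Int × List Int)) : List (Int × Int × Int × Int) :=
  ((PySem.List.enumerate H 0).foldl
    (fun (d : PySem.Dict Int (Int × Int × Int)) ie =>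
      match ie.2 with
      | [] => d.insert ie.1 (0, 0, 0)
      | v0 :: rest =>
        let sizes : List Int := (v0 :: rest).map (fun v => ((pvLookup v_neigh v).length : Int))
        let common : List Int :=
          rest.foldl (fun s v => PySem.Set.inter s (pvLookup v_neigh v)) (pvLookup v_neigh v0)
        d.insert ie.1 (((common.length : Int)),
          (PySem.List.max? sizes (fun x => x)).getD 0,
          (PySem.List.min? sizes (fun x => x)).getD 0))
    PySem.Dict.empty).items

-- ===== PORT B =====
def compute_neighborhood_sizes_alt (H : List (List Int)) (v_neigh : List (Int × List Int)) : List (Int × Int × Int × Int) :=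
  ((PySem.List.enumerate H 0).foldl
    (fun (d : PySem.Dict Int (Int × Int × Int)) ie =>
      match ie.2 with
      | [] => d.insert ie.1 (0, 0, 0)
      | v0 :: rest =>
        let k : Int := (((v0 :: rest).length : Int))
        let nv0 := pvLookup v_neigh v0
        let sz0 : Int := (nv0.length : Int)
        let tally0 := nv0.foldl (fun (t : PySem.Dict Int Int) x => t.modify x 0 (· + 1)) PySem.Dict.empty
        let st := rest.foldl
          (fun (st : PySem.Dict Int Int × Int × Int) v =>
            let nv := pvLookup v_neigh v
            let sz : Int := (nv.length : Int)
            let mx := if sz > st.2.1 then sz else st.2.1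
            let mn := if sz < st.2.2 then sz else st.2.2
            (nv.foldl (fun t x => t.modify x 0 (· + 1)) st.1, mx, mn))
          (tally0, sz0, sz0)
        let common : Int := (((st.1.values.filter (fun c => c == k)).length : Int))
        d.insert ie.1 (common, st.2.1, st.2.2))
    PySem.Dict.empty).items

-- ===== PRECONDITION & SPEC =====
-- Pre_ excludes exactly the inputs on which the Python raises KeyError (an edge vertex absent
-- from v_neigh); the Nodup clause is not a narrowing: v_neigh values are Python SETS, so under
-- the type convention they always hold distinct elements.
def Pre_compute_neighborhood_sizes (H : List (List Int)) (v_neigh : List (Int × List Int)) : Prop :=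
  (∀ e ∈ H, ∀ v ∈ e, (((PySem.Dict.mk v_neigh).get? v).isSome = true)) ∧
  (∀ p ∈ v_neigh, p.2.Nodup)
instance (H : List (List Int)) (v_neigh : List (Int × List Int)) : Decidable (Pre_compute_neighborhood_sizes H v_neigh) := by unfold Pre_compute_neighborhood_sizes; infer_instance

def pvWitness_compute_neighborhood_sizes : List (List Int) × (List (Int × List Int)) :=
  ([[1], [1, 2], []], [(1, [2, 3]), (2, [3])])

def Spec_compute_neighborhood_sizes (H : List (List Int)) (v_neigh : List (Int × List Int)) (out : List (Int × Int × Int × Int)) : Prop := out = compute_neighborhood_sizes_alt H v_neigh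
instance (H : List (List Int)) (v_neigh : List (Int × List Int)) (out : List (Int × Int × Int × Int)) : Decidable (Spec_compute_neighborhood_sizes H v_neigh out) := by unfold Spec_compute_neighborhood_sizes; infer_instance

-- ===== CLAIM (what is proved, stated in full; the proofs are below) =====
def Claim_equal_compute_neighborhood_sizes : Prop := ∀ (H : List (List Int)) (v_neigh : List (Int × List Int)), Dom_compute_neighborhood_sizes H v_neigh → Pre_compute_neighborhood_sizes H v_neigh → Spec_compute_neighborhood_sizes H v_neigh (compute_neighborhood_sizes H v_neigh)

-- ===== LEMMAS AND PROOFS =====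

-- the lookup of a vertex that has a key yields one of v_neigh's values, hence is duplicate-free
theorem pvLookup_nodup (v_neigh : List (Int × List Int)) (v : Int)
    (hnd : ∀ p ∈ v_neigh, p.2.Nodup) : (pvLookup v_neigh v).Nodup := by
  induction v_neigh with
  | nil => simp [pvLookup, PySem.Dict.get?]
  | cons p rest ih =>
    obtain ⟨pk, pv⟩ := p
    have hrest := ih (fun q hq => hnd q (by simp [hq]))
    by_cases h : pk == v
    · simp only [pvLookup, PySem.Dict.get?_mk_cons, h, if_true, Option.getD_some]
      exact hnd (pk, pv) (by simp)
    · simp only [pvLookup, PySem.Dict.get?_mk_cons, h]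
      simpa [pvLookup] using hrest

-- B's per-edge fold over a product state splits into three independent folds
theorem pv_split_fold (N : Int → List Int) (rest : List Int)
    (t : PySem.Dict Int Int) (mx mn : Int) :
    rest.foldl
      (fun (st : PySem.Dict Int Int × Int × Int) v =>
        let nv := N v
        let sz : Int := (nv.length : Int)
        ((nv.foldl (fun t x => t.modify x 0 (· + 1)) st.1),
         (if sz > st.2.1 then sz else st.2.1),
         (if sz < st.2.2 then sz else st.2.2)))
      (t, mx, mn)
    = (rest.foldl (fun t v => (N v).foldl (fun t x => t.modify x 0 (· + 1)) t) t,
       rest.foldl (fun m v => if ((N v).length : Int) > m then ((N v).length : Int) else m) mx,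
       rest.foldl (fun m v => if ((N v).length : Int) < m then ((N v).length : Int) else m) mn) := by
  induction rest generalizing t mx mn with
  | nil => rfl
  | cons v vs ih => simp only [List.foldl_cons]; exact ih _ _ _

-- running max with a strict-comparison update is Mathlib's max
theorem pv_run_max (f : Int → Int) (rest : List Int) (m : Int) :
    rest.foldl (fun m v => if f v > m then f v else m) m
      = rest.foldl (fun m v => max m (f v)) m := by
  apply PySem.List.foldl_congr_mem
  intro acc x _
  simp [max_def]; omega

theorem pv_run_min (f : Int → Int) (rest : List Int) (m : Int) :
    rest.foldl (fun m v => if f v < m then f v else m) m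
      = rest.foldl (fun m v => min m (f v)) m := by
  apply PySem.List.foldl_congr_mem
  intro acc x _
  simp [min_def]; omega

-- the iterated set intersection: membership and Nodup
theorem pv_inter_fold (N : Int → List Int) (rest : List Int) (s0 : List Int)
    (hs0 : s0.Nodup) :
    (rest.foldl (fun s v => PySem.Set.inter s (N v)) s0).Nodup ∧
    (∀ x, x ∈ rest.foldl (fun s v => PySem.Set.inter s (N v)) s0 ↔
      (x ∈ s0 ∧ ∀ v ∈ rest, x ∈ N v)) := by
  induction rest generalizing s0 with
  | nil => simpa using hs0
  | cons v vs ih =>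
    simp only [List.foldl_cons]
    obtain ⟨h1, h2⟩ := ih (PySem.Set.inter s0 (N v)) (PySem.Set.nodup_inter _ _ hs0)
    refine ⟨h1, fun x => ?_⟩
    rw [h2 x, PySem.Set.mem_inter]
    constructor
    · rintro ⟨⟨hx0, hxv⟩, hall⟩
      refine ⟨hx0, ?_⟩
      intro w hw
      rw [List.mem_cons] at hw
      rcases hw with rfl | hw
      · exact hxv
      · exact hall w hw
    · rintro ⟨hx0, hall⟩
      exact ⟨⟨hx0, hall v (by simp)⟩, fun w hw => hall w (by simp [hw])⟩

-- count of x in the concatenation of all neighbor lists of an edge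
theorem pv_count_flatMap (N : Int → List Int) (edge : List Int) (x : Int) :
    (edge.flatMap N).count x = (edge.map (fun v => (N v).count x)).sum := by
  induction edge with
  | nil => simp
  | cons v vs ih => simp [List.flatMap_cons, List.count_append, ih]

-- over duplicate-free neighbor lists, the occurrence tally is at most the edge length,
-- with equality exactly when x lies in every neighbor list
theorem pv_count_bound (N : Int → List Int) (edge : List Int) (x : Int)
    (hnd : ∀ v ∈ edge, (N v).Nodup) :
    (edge.map (fun v => (N v).count x)).sum ≤ edge.length ∧
    ((edge.map (fun v => (N v).count x)).sum = edge.length ↔ ∀ v ∈ edge, x ∈ N v) := by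
  induction edge with
  | nil => simp
  | cons v vs ih =>
    obtain ⟨hle, hiff⟩ := ih (fun w hw => hnd w (by simp [hw]))
    have hc1 : (N v).count x ≤ 1 := by
      have h := hnd v (by simp)
      rw [List.nodup_iff_count_le_one] at h
      exact h x
    have hcm : (N v).count x = 1 ↔ x ∈ N v := by
      rw [← List.count_pos_iff]
      omega
    simp only [List.map_cons, List.sum_cons, List.length_cons, List.mem_cons]
    constructor
    · omega
    · constructor
      · intro h w hw
        rcases hw with rfl | hw
        · exact hcm.1 (by omega)
        · exact hiff.1 (by omega) w hw
      · intro h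
        have h1 : (N v).count x = 1 := hcm.2 (h v (Or.inl rfl))
        have h2 : (vs.map (fun v => (N v).count x)).sum = vs.length :=
          hiff.2 (fun w hw => h w (Or.inr hw))
        omega

theorem pv_count_eq_len_iff (N : Int → List Int) (edge : List Int)
    (hnd : ∀ v ∈ edge, (N v).Nodup) (x : Int) :
    (edge.flatMap N).count x = edge.length ↔ ∀ v ∈ edge, x ∈ N v := by
  rw [pv_count_flatMap]
  exact (pv_count_bound N edge x hnd).2

-- filtering the counter's distinct keys by "tally = edge length" enumerates the same set
-- as the iterated intersection, so the two common-neighbor counts agree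
theorem pv_common_eq (N : Int → List Int) (v0 : Int) (rest : List Int)
    (hN : ∀ v, (N v).Nodup) :
    ((PySem.Set.ofList ((v0 :: rest).flatMap N)).filter
        (fun x => (((v0 :: rest).flatMap N).count x : Int) == ((v0 :: rest).length : Int))).length
      = (rest.foldl (fun s v => PySem.Set.inter s (N v)) (N v0)).length := by
  apply List.Perm.length_eq
  rw [List.perm_ext_iff_of_nodup
    (List.Nodup.filter _ (PySem.Set.nodup_ofList _))
    ((pv_inter_fold N rest (N v0) (hN v0)).1)]
  intro x
  rw [List.mem_filter, PySem.Set.mem_ofList, (pv_inter_fold N rest (N v0) (hN v0)).2 x]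
  have hq : ((((v0 :: rest).flatMap N).count x : Int) == ((v0 :: rest).length : Int)) = true
      ↔ ((v0 :: rest).flatMap N).count x = (v0 :: rest).length := by
    rw [beq_iff_eq]
    exact_mod_cast Iff.rfl
  rw [hq, pv_count_eq_len_iff N (v0 :: rest) (fun v _ => hN v) x]
  constructor
  · rintro ⟨-, h⟩
    exact ⟨h v0 (by simp), fun w hw => h w (by simp [hw])⟩
  · rintro ⟨h0, h⟩
    have hall : ∀ v ∈ (v0 :: rest), x ∈ N v := by
      intro w hw
      rw [List.mem_cons] at hw
      rcases hw with rfl | hw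
      · exact h0
      · exact h w hw
    exact ⟨List.mem_flatMap.2 ⟨v0, by simp, h0⟩, hall⟩

-- the per-edge triple produced by A equals the one produced by B
theorem pv_edge_eq (v_neigh : List (Int × List Int)) (v0 : Int) (rest : List Int)
    (hnd : ∀ p ∈ v_neigh, p.2.Nodup) :
    ((((rest.foldl (fun s v => PySem.Set.inter s (pvLookup v_neigh v)) (pvLookup v_neigh v0)).length : Int)),
      (PySem.List.max? ((v0 :: rest).map (fun v => ((pvLookup v_neigh v).length : Int))) (fun x => x)).getD 0,
      (PySem.List.min? ((v0 :: rest).map (fun v => ((pvLookup v_neigh v).length : Int))) (fun x => x)).getD 0)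
    =
    (let k : Int := (((v0 :: rest).length : Int))
     let nv0 := pvLookup v_neigh v0
     let sz0 : Int := (nv0.length : Int)
     let tally0 := nv0.foldl (fun (t : PySem.Dict Int Int) x => t.modify x 0 (· + 1)) PySem.Dict.empty
     let st := rest.foldl
       (fun (st : PySem.Dict Int Int × Int × Int) v =>
         let nv := pvLookup v_neigh v
         let sz : Int := (nv.length : Int)
         let mx := if sz > st.2.1 then sz else st.2.1
         let mn := if sz < st.2.2 then sz else st.2.2
         ((nv.foldl (fun t x => t.modify x 0 (· + 1)) st.1), mx, mn))
       (tally0, sz0, sz0)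
     ((((st.1.values.filter (fun c => c == k)).length : Int)), st.2.1, st.2.2)) := by
  have hN : ∀ v, (pvLookup v_neigh v).Nodup := fun v => pvLookup_nodup v_neigh v hnd
  simp only [pv_split_fold]
  refine Prod.ext ?_ (Prod.ext ?_ ?_)
  -- common-neighbor count
  · have htally : rest.foldl
          (fun t v => (pvLookup v_neigh v).foldl (fun (t : PySem.Dict Int Int) x => t.modify x 0 (· + 1)) t)
          ((pvLookup v_neigh v0).foldl (fun t x => t.modify x 0 (· + 1)) PySem.Dict.empty)
        = PySem.Dict.counter ((v0 :: rest).flatMap (pvLookup v_neigh)) := by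
      rw [PySem.Dict.counter_eq_foldl, List.foldl_flatMap, List.foldl_cons]
    have hv : (PySem.Dict.counter ((v0 :: rest).flatMap (pvLookup v_neigh))).values
        = (PySem.Set.ofList ((v0 :: rest).flatMap (pvLookup v_neigh))).map
            (fun x => ((((v0 :: rest).flatMap (pvLookup v_neigh)).count x : Int))) := by
      show (PySem.Dict.counter _).items.map (·.2) = _
      rw [PySem.Dict.items_counter, List.map_map]
      rfl
    simp only [htally, hv, List.filter_map, List.length_map, Function.comp_def]
    rw [pv_common_eq (pvLookup v_neigh) v0 rest hN]
  -- running max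
  · show (PySem.List.max? _ _).getD 0 = _
    rw [List.map_cons, PySem.List.max?_id_cons, Option.getD_some, List.foldl_map,
      ← pv_run_max (fun v => ((pvLookup v_neigh v).length : Int)) rest]
  -- running min
  · show (PySem.List.min? _ _).getD 0 = _
    rw [List.map_cons, PySem.List.min?_id_cons, Option.getD_some, List.foldl_map,
      ← pv_run_min (fun v => ((pvLookup v_neigh v).length : Int)) rest]

-- ===== VERDICT (by name: the statement is the Claim_ definition above) =====
theorem compute_neighborhood_sizes_spec : Claim_equal_compute_neighborhood_sizes := by
  intro H v_neigh _ hpre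
  unfold Spec_compute_neighborhood_sizes compute_neighborhood_sizes compute_neighborhood_sizes_alt
  congr 1
  apply PySem.List.foldl_congr_mem
  intro acc ie hie
  obtain ⟨kk, hk, rfl⟩ := (PySem.List.mem_enumerate_iff H 0 ie).1 hie
  cases he : H[kk] with
  | nil => rfl
  | cons v0 rest =>
    simp only
    have hedge : (v0 :: rest) ∈ H := he ▸ List.getElem_mem hk
    have := pv_edge_eq v_neigh v0 rest hpre.2
    simp only at this ⊢
    rw [this]
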